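-- pv_equiv track=rewrite | github.com/pmmmz/abki-ccs26-artifact | joint_decoding.py | expected_labels_for_indices_dynamic
-- ===== SOURCE A (Python) =====
-- def expected_labels_for_indices_dynamic(label_groups, indices):
--
--     label_map = {}
--     next_id = 1
--     flat = []
--
--     for idx in indices:
--         for t in label_groups[idx]:
--             if t not in label_map:
--                 label_map[t] = f"L{next_id}"
--                 next_id += 1
--             flat.append(label_map[t])
--
--     return flat
-- ===== SOURCE B (Python) =====
-- def expected_labels_for_indices_dynamic(label_groups, indices):
--     flat = [t for idx in indices for t in label_groups[idx]]
--     return ["L%d" % len(set(flat[:flat.index(t) + 1])) for t in flat]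
-- ===== Notes on version B (the rewrite author's own statement) =====
-- stated objective: alternative
-- what changed: A's stateful loop that grows a label dict with a counter is replaced by a stateless closed characterization: flatten once, then each token's label number is the count of distinct tokens in the flat list up to and including that token's first occurrence (flat.index + len(set(prefix))), with no dict, no counter and no incremental labeling.
import Mathlib
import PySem

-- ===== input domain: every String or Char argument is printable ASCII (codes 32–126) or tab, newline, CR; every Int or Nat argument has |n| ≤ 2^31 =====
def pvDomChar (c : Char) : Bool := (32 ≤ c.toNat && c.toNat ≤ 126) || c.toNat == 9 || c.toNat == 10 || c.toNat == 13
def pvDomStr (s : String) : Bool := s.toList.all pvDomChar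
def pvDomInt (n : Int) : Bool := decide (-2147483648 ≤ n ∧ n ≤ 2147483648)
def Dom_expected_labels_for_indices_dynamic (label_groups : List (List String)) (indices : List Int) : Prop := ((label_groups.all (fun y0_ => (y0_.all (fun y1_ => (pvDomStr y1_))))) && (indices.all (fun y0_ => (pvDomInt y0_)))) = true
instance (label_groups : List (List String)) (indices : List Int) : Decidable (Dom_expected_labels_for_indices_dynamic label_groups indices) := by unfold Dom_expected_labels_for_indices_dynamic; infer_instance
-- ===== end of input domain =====

-- B replaces A's stateful dict-and-counter labeling loop by a stateless closed characterization:
-- each token's label number is the count of distinct tokens up to and including its first occurrence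
-- in the flattened list; alternative decomposition (no dict, no counter), not faster.

-- shared helper: Python's label_groups[idx] (IndexError excluded by Pre_) and the f"L{n}" label
def pvGroup (label_groups : List (List String)) (idx : Int) : List String :=
  (PySem.List.pyGet? label_groups idx).getD []

def pvLab (n : Int) : String := "L" ++ PySem.Int.toStr n

-- ===== PORT A =====
-- A's loop body: state (label_map, next_id, flat)
def pvStepA (st : PySem.Dict String String × Int × List String) (t : String) :
    PySem.Dict String String × Int × List String :=
  match st.1.get? t with
  | some v => (st.1, st.2.1, st.2.2 ++ [v])
  | none => (st.1.insert t (pvLab st.2.1), st.2.1 + 1, st.2.2 ++ [pvLab st.2.1])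

def expected_labels_for_indices_dynamic (label_groups : List (List String)) (indices : List Int) : List String :=
  (indices.foldl
    (fun st idx => (pvGroup label_groups idx).foldl pvStepA st)
    (PySem.Dict.empty, (1 : Int), ([] : List String))).2.2

-- ===== PORT B =====
def expected_labels_for_indices_dynamic_alt (label_groups : List (List String)) (indices : List Int) : List String :=
  let flat := indices.flatMap (fun idx => pvGroup label_groups idx)
  flat.map (fun t =>
    let j := ((PySem.List.index? flat t).getD 0 : Nat)   -- flat.index(t); t ∈ flat so never ValueError
    "L" ++ PySem.Int.toStr ((PySem.Set.ofList (PySem.List.slice flat none (some ((j : Int) + 1)))).length))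

-- ===== PRECONDITION & SPEC =====
-- Pre_ excludes exactly the inputs where Python A raises IndexError: some index out of range of label_groups.
def Pre_expected_labels_for_indices_dynamic (label_groups : List (List String)) (indices : List Int) : Prop :=
  ∀ i ∈ indices, -(label_groups.length : Int) ≤ i ∧ i < (label_groups.length : Int)
instance (label_groups : List (List String)) (indices : List Int) : Decidable (Pre_expected_labels_for_indices_dynamic label_groups indices) := by unfold Pre_expected_labels_for_indices_dynamic; infer_instance

def pvWitness_expected_labels_for_indices_dynamic : List (List String) × List Int :=
  ([["a", "b"], ["a"]], [0, 1, 0, -1])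

def Spec_expected_labels_for_indices_dynamic (label_groups : List (List String)) (indices : List Int) (out : List String) : Prop := out = expected_labels_for_indices_dynamic_alt label_groups indices
instance (label_groups : List (List String)) (indices : List Int) (out : List String) : Decidable (Spec_expected_labels_for_indices_dynamic label_groups indices out) := by unfold Spec_expected_labels_for_indices_dynamic; infer_instance

-- ===== CLAIM (what is proved, stated in full; the proofs are below) =====
def Claim_equal_expected_labels_for_indices_dynamic : Prop := ∀ (label_groups : List (List String)) (indices : List Int), Dom_expected_labels_for_indices_dynamic label_groups indices → Pre_expected_labels_for_indices_dynamic label_groups indices → Spec_expected_labels_for_indices_dynamic label_groups indices (expected_labels_for_indices_dynamic label_groups indices)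

-- ===== LEMMAS AND PROOFS =====

-- first-match label lookup in a seen-list, labels starting at n
def pvLk : Int → List String → String → Option String
  | _, [], _ => none
  | n, x :: s, t => if t = x then some (pvLab n) else pvLk (n + 1) s t

-- ordered dedup of ts appended onto an already-deduplicated prefix s (A's insertion behaviour)
def pvDD (s ts : List String) : List String :=
  ts.foldl (fun s t => if t ∈ s then s else s ++ [t]) s

theorem pvLk_mono {t : String} : ∀ (s : List String) (n : Int) (e : List String),
    t ∈ s → pvLk n (s ++ e) t = pvLk n s t := by
  intro s
  induction s with
  | nil => intro n e h; simp at h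
  | cons x s ih =>
    intro n e h
    by_cases hx : t = x
    · simp [pvLk, hx]
    · have h' : t ∈ s := by
        rcases List.mem_cons.mp h with h1 | h1
        · exact absurd h1 hx
        · exact h1
      simpa [pvLk, hx] using ih (n + 1) e h'

theorem pvLk_not_mem {t : String} : ∀ (s : List String) (n : Int),
    t ∉ s → pvLk n s t = none := by
  intro s
  induction s with
  | nil => intro n _; rfl
  | cons x s ih =>
    intro n h
    simp only [List.mem_cons, not_or] at h
    simpa [pvLk, h.1] using ih (n + 1) h.2

theorem pvLk_mem_some {t : String} : ∀ (s : List String) (n : Int),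
    t ∈ s → ∃ v, pvLk n s t = some v := by
  intro s
  induction s with
  | nil => intro n h; simp at h
  | cons x s ih =>
    intro n h
    by_cases hx : t = x
    · exact ⟨pvLab n, by simp [pvLk, hx]⟩
    · have h' : t ∈ s := by
        rcases List.mem_cons.mp h with h1 | h1
        · exact absurd h1 hx
        · exact h1
      simpa [pvLk, hx] using ih (n + 1) h'

theorem pvLk_append_one {u t : String} : ∀ (s : List String) (n : Int),
    u ∉ s → pvLk n (s ++ [t]) u = if u = t then some (pvLab (n + s.length)) else none := by
  intro s
  induction s with
  | nil => intro n _; simp [pvLk]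
  | cons x s ih =>
    intro n h
    simp only [List.mem_cons, not_or] at h
    have := ih (n + 1) h.2
    simp only [List.cons_append, pvLk, h.1, if_false, this]
    split_ifs with hu
    · congr 2
      push_cast [List.length_cons]
      ring
    · rfl

theorem pvDD_cons (s : List String) (t : String) (ts : List String) :
    pvDD s (t :: ts) = pvDD (if t ∈ s then s else s ++ [t]) ts := rfl

theorem pvDD_prefix : ∀ (ts s : List String), ∃ e, pvDD s ts = s ++ e := by
  intro ts
  induction ts with
  | nil => intro s; exact ⟨[], by simp [pvDD]⟩
  | cons t ts ih =>
    intro s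
    rw [pvDD_cons]
    by_cases h : t ∈ s
    · simpa [h] using ih s
    · rcases ih (s ++ [t]) with ⟨e, he⟩
      exact ⟨t :: e, by simp [h, he]⟩

theorem pvDD_eq_update : ∀ (ts s : List String), pvDD s ts = PySem.Set.update s ts := by
  intro ts
  induction ts with
  | nil => intro s; rfl
  | cons t ts ih =>
    intro s
    rw [pvDD_cons, PySem.Set.update_cons, PySem.Set.add_eq_ite, ih]

theorem pvOfList_eq_pvDD (ts : List String) : PySem.Set.ofList ts = pvDD [] ts := by
  rw [pvDD_eq_update, PySem.Set.update_nil_left]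

-- the label of a token already in the seen-prefix is unchanged by further insertions
theorem pvLk_dd {t : String} (s ts : List String) (h : t ∈ s) :
    pvLk 1 (pvDD s ts) t = pvLk 1 s t := by
  rcases pvDD_prefix ts s with ⟨e, he⟩
  rw [he, pvLk_mono s 1 e h]

-- A's loop over any token list, characterised against the final dedup labelling
theorem pvLoopA : ∀ (ts : List String) (m : PySem.Dict String String) (s acc : List String),
    (∀ t, m.get? t = pvLk 1 s t) →
    (ts.foldl pvStepA (m, ((s.length : Int) + 1), acc)).2.2
      = acc ++ ts.map (fun t => (pvLk 1 (pvDD s ts) t).getD "") := by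
  intro ts
  induction ts with
  | nil => intro m s acc _; simp [pvDD]
  | cons t ts ih =>
    intro m s acc hm
    by_cases h : t ∈ s
    · -- already labelled: dict and counter unchanged
      have hlk : ∃ v, pvLk 1 s t = some v := pvLk_mem_some s 1 h
      rcases hlk with ⟨v, hv⟩
      have hstep : pvStepA (m, ((s.length : Int) + 1), acc) t
          = (m, ((s.length : Int) + 1), acc ++ [v]) := by
        simp [pvStepA, hm t, hv]
      rw [List.foldl_cons, hstep, ih m s (acc ++ [v]) hm, pvDD_cons, if_pos h]
      have hvfin : (pvLk 1 (pvDD s ts) t).getD "" = v := by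
        rw [pvLk_dd s ts h, hv]; rfl
      simp [hvfin]
    · -- fresh token: insert with label L(|s|+1)
      have hstep : pvStepA (m, ((s.length : Int) + 1), acc) t
          = (m.insert t (pvLab ((s.length : Int) + 1)), ((s.length : Int) + 1) + 1,
             acc ++ [pvLab ((s.length : Int) + 1)]) := by
        simp [pvStepA, hm t, pvLk_not_mem s 1 h]
      have hm' : ∀ u, (m.insert t (pvLab ((s.length : Int) + 1))).get? u = pvLk 1 (s ++ [t]) u := by
        intro u
        by_cases hu : u = t
        · subst hu
          rw [PySem.Dict.get?_insert_self _ _ _, pvLk_append_one s 1 h]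
          simp [add_comm]
        · rw [PySem.Dict.get?_insert_of_ne _ _ hu, hm u]
          by_cases hus : u ∈ s
          · rw [pvLk_mono s 1 [t] hus]
          · rw [pvLk_append_one s 1 hus, if_neg hu, pvLk_not_mem s 1 hus]
      have hlen : ((s.length : Int) + 1) + 1 = (((s ++ [t]).length : Int) + 1) := by
        push_cast [List.length_append, List.length_cons, List.length_nil]
        ring
      rw [List.foldl_cons, hstep, hlen,
        ih (m.insert t (pvLab ((s.length : Int) + 1))) (s ++ [t]) _ hm',
        pvDD_cons, if_neg h]
      have htfin : (pvLk 1 (pvDD (s ++ [t]) ts) t).getD "" = pvLab ((s.length : Int) + 1) := by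
        rw [pvLk_dd (s ++ [t]) ts (by simp), pvLk_append_one s 1 h, if_pos rfl]
        simp [add_comm]
      simp [htfin]

-- A's nested loop over indices is the single loop over the flattened token list
theorem pvFoldlNested (label_groups : List (List String)) :
    ∀ (l : List Int) (st : PySem.Dict String String × Int × List String),
    l.foldl (fun st idx => (pvGroup label_groups idx).foldl pvStepA st) st
      = (l.flatMap (fun idx => pvGroup label_groups idx)).foldl pvStepA st := by
  intro l
  induction l with
  | nil => intro st; rfl
  | cons i l ih => intro st; simp [List.flatMap_cons, List.foldl_append, ih]

-- the dedup-labelling of t equals L(number of distinct tokens up to and including t's first occurrence)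
theorem pvMain {t : String} : ∀ (xs s : List String) (j : Nat), t ∉ s →
    PySem.List.index? xs t = some j →
    pvLk 1 (pvDD s xs) t = some (pvLab ((pvDD s (xs.take (j + 1))).length)) := by
  intro xs
  induction xs with
  | nil => intro s j _ hj; simp [PySem.List.index?] at hj
  | cons x xs ih =>
    intro s j hs hj
    by_cases hx : t = x
    · subst hx
      rw [PySem.List.index?_cons_self] at hj
      obtain rfl : j = 0 := by simpa using hj.symm
      rw [pvDD_cons, if_neg hs]
      rw [pvLk_dd (s ++ [t]) xs (by simp)]
      rw [pvLk_append_one s 1 hs, if_pos rfl]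
      have : xs.take 0 = [] := rfl
      rw [List.take_succ_cons, this]
      have hdd : pvDD s [t] = s ++ [t] := by simp [pvDD, hs]
      rw [hdd]
      congr 1
      push_cast [List.length_append, List.length_cons, List.length_nil]
      ring
    · have hne : x ≠ t := fun e => hx e.symm
      rw [PySem.List.index?_cons_of_ne xs hne] at hj
      rcases Option.map_eq_some_iff.mp hj with ⟨j', hj', rfl⟩
      rw [pvDD_cons]
      have hs' : t ∉ (if x ∈ s then s else s ++ [x]) := by
        split_ifs with h
        · exact hs
        · simp [hs, hx]
      rw [ih _ j' hs' hj']
      rw [List.take_succ_cons, pvDD_cons]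

-- ===== VERDICT (by name: the statement is the Claim_ definition above) =====
theorem expected_labels_for_indices_dynamic_spec : Claim_equal_expected_labels_for_indices_dynamic := by
  intro label_groups indices _ _
  unfold Spec_expected_labels_for_indices_dynamic
  unfold expected_labels_for_indices_dynamic expected_labels_for_indices_dynamic_alt
  rw [pvFoldlNested]
  set flat := indices.flatMap (fun idx => pvGroup label_groups idx) with hflat
  have hinit : ∀ t, (PySem.Dict.empty : PySem.Dict String String).get? t = pvLk 1 [] t := by
    intro t; simp [pvLk]
  have hA := pvLoopA flat PySem.Dict.empty [] [] hinit
  norm_num at hA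
  rw [hA]
  apply List.map_congr_left
  intro t ht
  obtain ⟨j, hj⟩ : ∃ j, PySem.List.index? flat t = some j := by
    have := (PySem.List.index?_isSome_iff (xs := flat) (v := t)).mpr ht
    exact Option.isSome_iff_exists.mp this
  rw [pvMain flat [] j (by simp) hj, hj]
  have hslice : PySem.List.slice flat none (some ((j : Int) + 1)) = flat.take (j + 1) := by
    have : ((j : Int) + 1) = ((j + 1 : Nat) : Int) := by push_cast; ring
    rw [this, PySem.List.slice_to_natCast]
  simp only [Option.getD_some, hslice, pvOfList_eq_pvDD]
  rfl
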